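-- pv_equiv track=rewrite | github.com/shanene922/sujing--SCM--PurchaseCostDown | src/utils.py | first_valid_header_row
-- ===== SOURCE A (Python) =====
-- from typing import Any, Iterable, Optional, Tuple
-- import math
--
-- def is_blank(value: Any) -> bool:
--     if value is None:
--         return True
--     if isinstance(value, float) and math.isnan(value):
--         return True
--     return str(value).strip() == ""
--
-- def first_valid_header_row(rows: list[list[Any]], minimum_non_empty: int = 3) -> int:
--     best_index = 0
--     best_score = -1
--     for idx, row in enumerate(rows):
--         score = sum(0 if is_blank(cell) else 1 for cell in row)
--         if score >= minimum_non_empty and score > best_score: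
--             best_score = score
--             best_index = idx
--     return best_index
-- ===== SOURCE B (Python) =====
-- import math
-- from typing import Any
--
-- def is_blank(value: Any) -> bool:
--     if value is None:
--         return True
--     if isinstance(value, float) and math.isnan(value):
--         return True
--     return str(value).strip() == ""
--
-- def first_valid_header_row(rows: list[list[Any]], minimum_non_empty: int = 3) -> int:
--     scores = [sum(1 for c in row if not is_blank(c)) for row in rows]
--     qualifying = [s for s in scores if s >= minimum_non_empty]
--     if not qualifying:
--         return 0
--     return scores.index(max(qualifying))
-- ===== Notes on version B (the rewrite author's own statement) =====
-- stated objective: alternative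
-- what changed: Replaces A's single running-best loop (index/score accumulator updated under a strict-improvement test) by a two-phase decomposition: materialize the score of every row, take max() of the qualifying scores, and return scores.index() of that maximum (first occurrence reproduces A's earliest-on-tie choice).
import Mathlib
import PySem

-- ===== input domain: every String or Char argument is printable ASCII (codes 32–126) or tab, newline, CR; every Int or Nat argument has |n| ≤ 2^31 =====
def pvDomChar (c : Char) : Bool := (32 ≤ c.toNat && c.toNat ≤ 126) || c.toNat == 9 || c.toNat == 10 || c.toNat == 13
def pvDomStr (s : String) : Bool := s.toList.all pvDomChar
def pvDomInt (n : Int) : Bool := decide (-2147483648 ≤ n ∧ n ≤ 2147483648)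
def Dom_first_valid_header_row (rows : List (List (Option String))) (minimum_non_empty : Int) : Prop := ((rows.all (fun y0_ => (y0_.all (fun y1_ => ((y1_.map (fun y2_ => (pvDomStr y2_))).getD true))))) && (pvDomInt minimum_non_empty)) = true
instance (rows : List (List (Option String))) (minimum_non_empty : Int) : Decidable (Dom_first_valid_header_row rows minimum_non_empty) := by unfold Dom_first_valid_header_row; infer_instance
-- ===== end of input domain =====

-- B separates scoring (materialize the score of every row) from selection (max of the
-- qualifying scores, then the first index carrying it) instead of A's single running-best
-- loop; objective: alternative decomposition, same cost.

-- ===== PORT A =====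
-- is_blank: for Option String cells, None is blank, otherwise blank iff str(value).strip() == ""
def pvIsBlank (c : Option String) : Bool :=
  match c with
  | none => true
  | some s => PySem.Str.strip s == ""

def first_valid_header_row (rows : List (List (Option String))) (minimum_non_empty : Int) : Int :=
  ((PySem.List.enumerate rows 0).foldl
    (fun (st : Int × Int) p =>
      let score : Int := (p.2.map (fun c => if pvIsBlank c then (0 : Int) else 1)).sum
      if minimum_non_empty ≤ score ∧ st.2 < score then (p.1, score) else st)
    (0, -1)).1

-- ===== PORT B =====
-- sum(1 for c in row if not is_blank(c))
def pvScore (row : List (Option String)) : Int :=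
  ((row.filter (fun c => !pvIsBlank c)).map (fun _ => (1 : Int))).sum

def first_valid_header_row_alt (rows : List (List (Option String))) (minimum_non_empty : Int) : Int :=
  let scores := rows.map pvScore
  let qualifying := scores.filter (fun s => decide (minimum_non_empty ≤ s))
  match PySem.List.max? qualifying (fun x => x) with
  | none => 0
  | some best =>
    match PySem.List.index? scores best with
    | some i => (i : Int)
    | none => 0  -- unreachable: best ∈ scores

-- ===== PRECONDITION & SPEC =====
def Spec_first_valid_header_row (rows : List (List (Option String))) (minimum_non_empty : Int) (out : Int) : Prop := out = first_valid_header_row_alt rows minimum_non_empty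
instance (rows : List (List (Option String))) (minimum_non_empty : Int) (out : Int) : Decidable (Spec_first_valid_header_row rows minimum_non_empty out) := by unfold Spec_first_valid_header_row; infer_instance

-- ===== CLAIM (what is proved, stated in full; the proofs are below) =====
def Claim_equal_first_valid_header_row : Prop := ∀ (rows : List (List (Option String))) (minimum_non_empty : Int), Dom_first_valid_header_row rows minimum_non_empty → Spec_first_valid_header_row rows minimum_non_empty (first_valid_header_row rows minimum_non_empty)

-- ===== LEMMAS AND PROOFS =====

-- A's running-best loop, over the list of scores, with explicit running index
def pvALoop (m : Int) : List Int → Int → Int × Int → Int × Int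
  | [], _, st => st
  | s :: ss, k, st => pvALoop m ss (k + 1) (if m ≤ s ∧ st.2 < s then (k, s) else st)

-- first index of v in ss, as an Int (0 when absent)
def pvAidx (ss : List Int) (v : Int) : Int :=
  match PySem.List.index? ss v with
  | some i => (i : Int)
  | none => 0

lemma pvScore_eq (row : List (Option String)) :
    (row.map (fun c => if pvIsBlank c then (0 : Int) else 1)).sum = pvScore row := by
  induction row with
  | nil => simp [pvScore]
  | cons c cs ih =>
    by_cases h : pvIsBlank c <;> simp [pvScore, h] at ih ⊢ <;> omega

lemma pvScore_nonneg (row : List (Option String)) : 0 ≤ pvScore row := by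
  unfold pvScore
  induction row with
  | nil => simp
  | cons c cs ih =>
    by_cases h : pvIsBlank c <;> simp [h] at ih ⊢ <;> omega

lemma pvA_fold_eq (m : Int) (rows : List (List (Option String))) :
    ∀ (k : Int) (st : Int × Int),
    (PySem.List.enumerate rows k).foldl
      (fun (st : Int × Int) p =>
        let score : Int := (p.2.map (fun c => if pvIsBlank c then (0 : Int) else 1)).sum
        if m ≤ score ∧ st.2 < score then (p.1, score) else st) st
      = pvALoop m (rows.map (fun r => (r.map (fun c => if pvIsBlank c then (0 : Int) else 1)).sum)) k st := by
  induction rows with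
  | nil => intro k st; simp [PySem.List.enumerate_nil, pvALoop]
  | cons r rs ih =>
    intro k st
    simp only [PySem.List.enumerate_cons, List.foldl_cons, List.map_cons, pvALoop]
    exact ih (k + 1) _

lemma pvMaxNil : PySem.List.max? ([] : List Int) (fun x => x) = none := by
  exact (PySem.List.max?_eq_none_iff _ _).mpr rfl

lemma pvFoldl_max_eq_self (t : List Int) : ∀ a, (∀ x ∈ t, x ≤ a) → t.foldl max a = a := by
  induction t with
  | nil => intro a _; rfl
  | cons x t ih =>
    intro a h
    have hx : x ≤ a := h x (by simp)
    have hax : max a x = a := by omega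
    simp only [List.foldl_cons, hax]
    exact ih a (fun y hy => h y (by simp [hy]))

lemma pvFoldl_max_eq (t : List Int) : ∀ a b, a ≤ b → b ∈ t → (∀ x ∈ t, x ≤ b) →
    t.foldl max a = b := by
  induction t with
  | nil => intro a b _ h; simp at h
  | cons x t ih =>
    intro a b hab hmem hub
    simp only [List.foldl_cons]
    by_cases hbt : b ∈ t
    · exact ih (max a x) b (by have := hub x (by simp); omega) hbt
        (fun y hy => hub y (by simp [hy]))
    · have hbx : b = x := by
        rcases List.mem_cons.mp hmem with h | h
        · exact h
        · exact absurd h hbt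
      subst hbx
      have hmx : max a b = b := by omega
      rw [hmx]
      exact pvFoldl_max_eq_self t b (fun y hy => hub y (by simp [hy]))

lemma pvAidx_cons_self (s : Int) (ss : List Int) : pvAidx (s :: ss) s = 0 := by
  unfold pvAidx
  rw [PySem.List.index?_cons_self]
  rfl

lemma pvAidx_cons_of_ne (s v : Int) (ss : List Int) (hne : s ≠ v) (hmem : v ∈ ss) :
    pvAidx (s :: ss) v = pvAidx ss v + 1 := by
  obtain ⟨j, hj⟩ := Option.isSome_iff_exists.mp ((PySem.List.index?_isSome_iff ss v).mpr hmem)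
  unfold pvAidx
  rw [PySem.List.index?_cons_of_ne ss hne, hj]
  simp

-- the running-best loop equals: max of the still-beatable qualifying scores, located by first index
lemma pvALoop_char (m : Int) (ss : List Int) : ∀ (k bi bs : Int),
    (pvALoop m ss k (bi, bs)).1 =
      match PySem.List.max? (ss.filter (fun s => decide (m ≤ s) && decide (bs < s))) (fun x => x) with
      | none => bi
      | some best => k + pvAidx ss best := by
  induction ss with
  | nil => intro k bi bs; simp only [pvALoop, List.filter_nil, pvMaxNil]
  | cons s ss ih =>
    intro k bi bs
    by_cases h : m ≤ s ∧ bs < s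
    · -- the head qualifies and beats the running best
      simp only [pvALoop, if_pos h]
      rw [ih (k + 1) k s]
      have hfil : (s :: ss).filter (fun x => decide (m ≤ x) && decide (bs < x))
          = s :: ss.filter (fun x => decide (m ≤ x) && decide (bs < x)) := by
        simp [h.1, h.2]
      rw [hfil]
      rcases hcase : ss.filter (fun x => decide (m ≤ x) && decide (s < x)) with _ | ⟨y, ys⟩
      · -- nothing later beats s: the overall max is s, first found at the head
        have hno : ∀ x ∈ ss, m ≤ x → ¬ s < x := by
          intro x hx hmx hsx
          have hxin : x ∈ ss.filter (fun x => decide (m ≤ x) && decide (s < x)) := by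
            simp [List.mem_filter, hx, hmx, hsx]
          rw [hcase] at hxin; simp at hxin
        have hmaxs : PySem.List.max? (s :: ss.filter (fun x => decide (m ≤ x) && decide (bs < x))) (fun x => x)
            = some s := by
          rw [PySem.List.max?_id_cons]
          congr 1
          apply pvFoldl_max_eq_self
          intro x hx
          simp [List.mem_filter] at hx
          by_contra hc
          exact hno x hx.1 hx.2.1 (by omega)
        rw [pvMaxNil, hmaxs]
        show k = k + pvAidx (s :: ss) s
        rw [pvAidx_cons_self]
        ring
      · -- some later qualifying score beats s: b is its max
        have hb := PySem.List.max?_id_cons (x := y) (t := ys)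
        set b := ys.foldl max y with hbdef
        have hb' : PySem.List.max? (ss.filter (fun x => decide (m ≤ x) && decide (s < x))) (fun x => x)
            = some b := by rw [hcase]; exact hb
        have hbmem := PySem.List.max?_mem hb'
        have hbmax : ∀ z ∈ ss.filter (fun x => decide (m ≤ x) && decide (s < x)), z ≤ b := by
          intro z hz
          simpa using PySem.List.max?_isMax hb' z hz
        simp only [List.mem_filter, decide_eq_true_eq, Bool.and_eq_true] at hbmem
        obtain ⟨hbss, hbm, hbs⟩ := hbmem
        have hmax2 : PySem.List.max? (s :: ss.filter (fun x => decide (m ≤ x) && decide (bs < x))) (fun x => x)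
            = some b := by
          rw [PySem.List.max?_id_cons]
          congr 1
          apply pvFoldl_max_eq
          · omega
          · simp only [List.mem_filter, decide_eq_true_eq, Bool.and_eq_true]
            exact ⟨hbss, hbm, by omega⟩
          · intro x hx
            simp only [List.mem_filter, decide_eq_true_eq, Bool.and_eq_true] at hx
            by_cases hxs : x ≤ s
            · omega
            · apply hbmax
              simp only [List.mem_filter, decide_eq_true_eq, Bool.and_eq_true]
              exact ⟨hx.1, hx.2.1, by omega⟩
        rw [hb, hmax2]
        show k + 1 + pvAidx ss b = k + pvAidx (s :: ss) b
        rw [pvAidx_cons_of_ne s b ss (by omega) hbss]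
        ring
    · -- the head does not update the running best
      simp only [pvALoop, if_neg h]
      rw [ih (k + 1) bi bs]
      have hfil : (s :: ss).filter (fun x => decide (m ≤ x) && decide (bs < x))
          = ss.filter (fun x => decide (m ≤ x) && decide (bs < x)) := by
        simp only [List.filter_cons]
        have hfalse : (decide (m ≤ s) && decide (bs < s)) = false := by
          rcases not_and_or.mp h with h1 | h1 <;> simp [h1]
        rw [hfalse]
        simp
      rw [hfil]
      rcases hcase : ss.filter (fun x => decide (m ≤ x) && decide (bs < x)) with _ | ⟨y, ys⟩
      · rw [pvMaxNil]
      · have hb := PySem.List.max?_id_cons (x := y) (t := ys)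
        set b := ys.foldl max y with hbdef
        have hb' : PySem.List.max? (ss.filter (fun x => decide (m ≤ x) && decide (bs < x))) (fun x => x)
            = some b := by rw [hcase]; exact hb
        have hbmem := PySem.List.max?_mem hb'
        simp only [List.mem_filter, decide_eq_true_eq, Bool.and_eq_true] at hbmem
        obtain ⟨hbss, hbm, hbbs⟩ := hbmem
        rw [hb]
        show k + 1 + pvAidx ss b = k + pvAidx (s :: ss) b
        rw [pvAidx_cons_of_ne s b ss (by rintro rfl; exact h ⟨hbm, hbbs⟩) hbss]
        ring

-- ===== VERDICT (by name: the statement is the Claim_ definition above) =====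
theorem first_valid_header_row_spec : Claim_equal_first_valid_header_row := by
  intro rows m _
  unfold Spec_first_valid_header_row first_valid_header_row first_valid_header_row_alt
  rw [pvA_fold_eq m rows 0 (0, -1)]
  have hmapeq : rows.map (fun r => (r.map (fun c => if pvIsBlank c then (0 : Int) else 1)).sum)
      = rows.map pvScore := by
    exact List.map_congr_left (fun r _ => pvScore_eq r)
  rw [hmapeq, pvALoop_char m (rows.map pvScore) 0 0 (-1)]
  have hfil : (rows.map pvScore).filter (fun s => decide (m ≤ s) && decide ((-1 : Int) < s))
      = (rows.map pvScore).filter (fun s => decide (m ≤ s)) := by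
    apply List.filter_congr
    intro x hx
    obtain ⟨r, _, rfl⟩ := List.mem_map.mp hx
    have := pvScore_nonneg r
    simp; omega
  rw [hfil]
  rcases hmax : PySem.List.max? ((rows.map pvScore).filter (fun s => decide (m ≤ s))) (fun x => x) with _ | b
  · simp [hmax]
  · have hbmem : b ∈ (rows.map pvScore).filter (fun s => decide (m ≤ s)) := PySem.List.max?_mem hmax
    simp [hmax, pvAidx]
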